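-- pv_equiv track=rewrite | github.com/eroge-69/PyToExe | python-files/tf_2_arabic_visual_order_converter_windows_exe_python_tkinter.py | insert_zwj
-- ===== SOURCE A (Python) =====
-- def insert_zwj(s: str) -> str:
--     ZWJ = '\u200D'
--     out = []
--     for i, ch in enumerate(s):
--         out.append(ch)
--         if i+1 < len(s) and ch != ' ' and s[i+1] != ' ':
--             out.append(ZWJ)
--     return ''.join(out)
-- ===== SOURCE B (Python) =====
-- def insert_zwj(s: str) -> str:
--     ZWJ = '\u200D'
--     return ' '.join(ZWJ.join(word) for word in s.split(' '))
-- ===== Notes on version B (the rewrite author's own statement) =====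
-- stated objective: faster
-- what changed: Replaces the per-character indexed loop with lookahead and an accumulator list by splitting on single spaces, ZWJ-joining each run of non-space characters, and rejoining with spaces.
import Mathlib
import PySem

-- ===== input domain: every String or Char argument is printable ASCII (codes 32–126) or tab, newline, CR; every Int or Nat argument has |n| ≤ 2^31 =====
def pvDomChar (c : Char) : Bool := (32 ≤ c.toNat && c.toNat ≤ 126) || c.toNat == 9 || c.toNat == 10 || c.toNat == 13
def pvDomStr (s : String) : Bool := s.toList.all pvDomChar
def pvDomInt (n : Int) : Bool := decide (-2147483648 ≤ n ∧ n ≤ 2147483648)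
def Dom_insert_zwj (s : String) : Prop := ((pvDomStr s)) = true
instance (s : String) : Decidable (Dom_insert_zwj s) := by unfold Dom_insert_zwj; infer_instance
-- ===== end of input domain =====

-- B replaces A's per-character indexed loop with split-on-space / ZWJ-join-each-word / rejoin (same O(n), measured constant-factor faster via str.split/str.join).

-- ===== PORT A =====
-- Python `s[i+1]` is guarded by `i+1 < len(s)`; pyGetD's default ' ' is only read when that
-- guard is false, so the conjunction has the same value as Python's short-circuit `and`.
def insert_zwj (s : String) : String :=
  let ZWJ : Char := '\u200D'
  let cs := s.toList
  let out : List Char := (PySem.List.enumerate cs 0).foldl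
    (fun out p =>
      let out := out ++ [p.2]
      if p.1 + 1 < (cs.length : Int) ∧ p.2 ≠ ' ' ∧ PySem.List.pyGetD cs (p.1 + 1) ' ' ≠ ' '
      then out ++ [ZWJ] else out) []
  String.ofList out

-- ===== PORT B =====
def insert_zwj_alt (s : String) : String :=
  let ZWJ : Char := '\u200D'
  String.ofList (PySem.Chars.join [' ']
    ((PySem.Chars.splitOn s.toList [' ']).map
      (fun word => PySem.Chars.join [ZWJ] (word.map (fun c => [c])))))

-- ===== PRECONDITION & SPEC =====
def Spec_insert_zwj (s : String) (out : String) : Prop := out = insert_zwj_alt s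
instance (s : String) (out : String) : Decidable (Spec_insert_zwj s out) := by unfold Spec_insert_zwj; infer_instance

-- ===== CLAIM (what is proved, stated in full; the proofs are below) =====
def Claim_equal_insert_zwj : Prop := ∀ (s : String), Dom_insert_zwj s → Spec_insert_zwj s (insert_zwj s)

-- ===== LEMMAS AND PROOFS =====

def zwjChar : Char := '\u200D'

-- common recursive characterisation: insert zwjChar between adjacent non-space chars
def zwjRec : List Char → List Char
  | [] => []
  | c :: t => c :: ((if c ≠ ' ' ∧ t.headD ' ' ≠ ' ' then [zwjChar] else []) ++ zwjRec t)

-- Python str.split(' ') as a plain structural recursion (pre = current piece so far)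
def splitRec : List Char → List Char → List (List Char)
  | pre, [] => [pre]
  | pre, c :: t => if c = ' ' then pre :: splitRec [] t else splitRec (pre ++ [c]) t

-- state machine for B's joined output: b = "the previous char was non-space"
def wjoin : Bool → List Char → List Char
  | _, [] => []
  | b, c :: t =>
    if c = ' ' then ' ' :: wjoin false t
    else (if b then [zwjChar] else []) ++ c :: wjoin true t

def zinner (w : List Char) : List Char := PySem.Chars.join [zwjChar] (w.map (fun c => [c]))

theorem splitRec_ne_nil (l pre : List Char) : splitRec pre l ≠ [] := by
  induction l generalizing pre with
  | nil => simp [splitRec]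
  | cons c t ih => simp only [splitRec]; split_ifs <;> simp [ih]


set_option maxRecDepth 8000 in
theorem splitOn_go_eq (fuel : Nat) : ∀ (l cur : List Char) (acc : List (List Char)),
    l.length ≤ fuel →
    PySem.Chars.splitOn.go [' '] fuel l cur acc = acc.reverse ++ splitRec cur.reverse l := by
  induction fuel with
  | zero =>
    intro l cur acc h
    have : l = [] := List.eq_nil_of_length_eq_zero (Nat.le_zero.mp h)
    subst this
    simp [PySem.Chars.splitOn.go, splitRec]
  | succ f ih =>
    intro l cur acc h
    cases l with
    | nil => simp [PySem.Chars.splitOn.go, splitRec]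
    | cons c rest =>
      simp only [PySem.Chars.splitOn.go, List.isPrefixOf, Bool.and_true]
      by_cases hc : c = ' '
      · subst hc
        simp only [beq_self_eq_true, if_pos, List.length_cons, List.length_nil,
          List.drop_succ_cons, List.drop_zero]
        rw [ih rest [] (cur.reverse :: acc) (by simp only [List.length_cons] at h; omega)]
        rw [splitRec]
        simp
      · have hbeq : (' ' == c) = false := beq_eq_false_iff_ne.mpr (Ne.symm hc)
        simp only [hbeq, Bool.false_eq_true, if_neg, not_false_eq_true]
        rw [ih rest (c :: cur) acc (by simp only [List.length_cons] at h; omega)]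
        rw [splitRec]
        simp [hc]

theorem splitOn_eq_splitRec (cs : List Char) :
    PySem.Chars.splitOn cs [' '] = splitRec [] cs := by
  have := splitOn_go_eq (cs.length + 1) cs [] [] (by omega)
  simpa [PySem.Chars.splitOn] using this

theorem zinner_cons (a : Char) (pre : List Char) (hpre : pre ≠ []) :
    zinner (a :: pre) = a :: zwjChar :: zinner pre := by
  obtain ⟨y, ys, hy⟩ := List.exists_cons_of_ne_nil hpre
  subst hy
  simp [zinner, PySem.Chars.join_cons_cons]

theorem inner_append (pre : List Char) (c : Char) :
    zinner (pre ++ [c]) = zinner pre ++ (if pre = [] then [] else [zwjChar]) ++ [c] := by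
  induction pre with
  | nil => simp [zinner, PySem.Chars.join_singleton, PySem.Chars.join_nil]
  | cons a pre ih =>
    rw [List.cons_append, zinner_cons a (pre ++ [c]) (by simp), ih]
    cases pre with
    | nil => simp [zinner, PySem.Chars.join_nil, PySem.Chars.join_singleton]
    | cons b pre' =>
      rw [zinner_cons a (b :: pre') (by simp)]
      simp

theorem join_splitRec (l : List Char) : ∀ (pre : List Char),
    PySem.Chars.join [' '] ((splitRec pre l).map zinner) = zinner pre ++ wjoin (!pre.isEmpty) l := by
  induction l with
  | nil => intro pre; simp [splitRec, wjoin, PySem.Chars.join_singleton]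
  | cons c t ih =>
    intro pre
    by_cases hc : c = ' '
    · subst hc
      have hsplit : splitRec pre (' ' :: t) = pre :: splitRec [] t := by
        rw [splitRec]; simp
      have hne : (splitRec [] t).map zinner ≠ [] := by
        simpa using splitRec_ne_nil t []
      obtain ⟨y, ys, hy⟩ := List.exists_cons_of_ne_nil hne
      have hjt : PySem.Chars.join [' '] ((splitRec [] t).map zinner) = wjoin false t := by
        simpa [zinner, PySem.Chars.join_nil] using ih []
      rw [hsplit, List.map_cons, hy, PySem.Chars.join_cons_cons, ← hy, hjt]
      rw [show wjoin (!pre.isEmpty) (' ' :: t) = ' ' :: wjoin false t from by rw [wjoin]; simp]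
      simp
    · have hsplit : splitRec pre (c :: t) = splitRec (pre ++ [c]) t := by
        rw [splitRec]; simp [hc]
      rw [hsplit, ih (pre ++ [c]), inner_append]
      rw [show wjoin (!pre.isEmpty) (c :: t)
            = (if !pre.isEmpty then [zwjChar] else []) ++ c :: wjoin true t from by
        rw [wjoin]; simp [hc]]
      cases pre <;> simp

theorem wjoin_eq (l : List Char) : ∀ (b : Bool),
    wjoin b l = (if b = true ∧ l.headD ' ' ≠ ' ' then [zwjChar] else []) ++ zwjRec l := by
  induction l with
  | nil => intro b; simp [wjoin, zwjRec]
  | cons c t ih =>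
    intro b
    by_cases hc : c = ' '
    · subst hc; simp [wjoin, zwjRec, ih]
    · simp [wjoin, zwjRec, hc, ih true]

theorem A_loop (cs : List Char) : ∀ (xs : List Char) (k : Nat) (acc : List Char),
    cs.drop k = xs →
    (PySem.List.enumerate xs (k : Int)).foldl
      (fun out p =>
        let out := out ++ [p.2]
        if p.1 + 1 < (cs.length : Int) ∧ p.2 ≠ ' ' ∧ PySem.List.pyGetD cs (p.1 + 1) ' ' ≠ ' '
        then out ++ [zwjChar] else out) acc = acc ++ zwjRec xs := by
  intro xs
  induction xs with
  | nil => intro k acc h; simp [PySem.List.enumerate_nil, zwjRec]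
  | cons c t ih =>
    intro k acc h
    have hk : k ≤ cs.length := by
      by_contra hk
      have : cs.drop k = [] := List.drop_eq_nil_of_le (by omega)
      simp [this] at h
    have hlen : cs.length - k = t.length + 1 := by
      have := congrArg List.length h
      simpa using this
    have ht : cs.drop (k + 1) = t := by
      rw [← List.tail_drop, h, List.tail_cons]
    have hcast : ((k : Int) + 1) = ((k + 1 : Nat) : Int) := by push_cast; ring
    have hget : PySem.List.pyGetD cs (((k + 1 : Nat)) : Int) ' ' = t.headD ' ' := by
      rw [PySem.List.pyGetD_natCast, List.getD_eq_getElem?_getD,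
        show cs[k+1]? = (cs.drop (k+1))[0]? from by rw [List.getElem?_drop], ht]
      cases t <;> simp
    rw [PySem.List.enumerate_cons, List.foldl_cons]
    simp only [hcast, hget]
    cases t with
    | nil =>
      have hL : cs.length = k + 1 := by simp at hlen; omega
      have hfalse : ¬ (((k + 1 : Nat) : Int) < (cs.length : Int)) := by
        rw [hL]; push_cast; omega
      rw [if_neg (fun hcon => hfalse hcon.1)]
      rw [ih (k + 1) (acc ++ [c]) ht]
      simp [zwjRec]
    | cons d t' =>
      have htrue : (((k + 1 : Nat) : Int) < (cs.length : Int)) := by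
        have : k + 1 < cs.length := by simp at hlen; omega
        exact_mod_cast this
      by_cases hcond : c ≠ ' ' ∧ (d :: t').headD ' ' ≠ ' '
      · rw [if_pos ⟨htrue, hcond.1, hcond.2⟩]
        rw [ih (k + 1) (acc ++ [c] ++ [zwjChar]) ht]
        have hd : d ≠ ' ' := by simpa using hcond.2
        simp [zwjRec, hcond.1, hd]
      · rw [if_neg (fun hcon => hcond ⟨hcon.2.1, hcon.2.2⟩)]
        rw [ih (k + 1) (acc ++ [c]) ht]
        have : (if c ≠ ' ' ∧ (d :: t').headD ' ' ≠ ' ' then [zwjChar] else []) = [] :=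
          if_neg hcond
        simp [zwjRec]
        intro hcne
        by_contra hd
        exact hcond ⟨hcne, by simpa using hd⟩

theorem insert_zwj_eq (s : String) : insert_zwj s = String.ofList (zwjRec s.toList) := by
  have h := A_loop s.toList s.toList 0 [] (by simp)
  simp only [insert_zwj]
  refine congrArg String.ofList ?_
  simpa [zwjChar] using h

theorem insert_zwj_alt_eq (s : String) : insert_zwj_alt s = String.ofList (zwjRec s.toList) := by
  have h1 := splitOn_eq_splitRec s.toList
  have h2 := join_splitRec s.toList []
  have h3 := wjoin_eq s.toList false
  simp only [insert_zwj_alt, h1]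
  have : (fun word => PySem.Chars.join ['\u200D'] (word.map (fun c => [c]))) = zinner := by
    funext w; simp [zinner, zwjChar]
  rw [this]
  simp only [h2, List.isEmpty_nil, Bool.not_true]
  simp only [h3]
  simp [zinner, PySem.Chars.join_nil]

-- ===== VERDICT (by name: the statement is the Claim_ definition above) =====
theorem insert_zwj_spec : Claim_equal_insert_zwj := by
  intro s _
  unfold Spec_insert_zwj
  rw [insert_zwj_eq, insert_zwj_alt_eq]
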